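-- pv_equiv track=rewrite | github.com/roollamora/Demos | validate-deps.py | reaches_end
-- ===== SOURCE A (Python) =====
-- def reaches_end(node, edges_list, visited=None):
--     if visited is None:
--         visited = set()
--     if node in visited:
--         return False
--     visited.add(node)
--
--     outgoing = [t for s, t in edges_list if s == node]
--     if not outgoing:
--         return node == '6.5.6'
--
--     return all(reaches_end(n, edges_list, visited.copy()) for n in outgoing)
-- ===== SOURCE B (Python) =====
-- def _ok(n, succ, banned, good):
--     if n in banned:
--         return False
--     outs = succ.get(n, [])
--     if not outs:
--         return n == '6.5.6'
--     return all(m in good for m in outs)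
--
--
-- def reaches_end(node, edges_list, visited=None):
--     # Bottom-up least-fixpoint computation over an adjacency dict: a node is
--     # "good" iff it is not banned and either it is the sink '6.5.6' or all its
--     # successors are good.  Cycles never enter the fixpoint, so a reachable
--     # cycle yields False, exactly like A's path-revisit check.
--     banned = visited if visited is not None else set()
--     succ = {}
--     for s, t in edges_list:
--         succ.setdefault(s, []).append(t)
--     nodes = []
--     seen = set()
--     for x in [node] + [x for e in edges_list for x in e]:
--         if x not in seen:
--             seen.add(x)
--             nodes.append(x)
--     good = set()
--     for _ in range(len(nodes)):
--         new = {n for n in nodes if _ok(n, succ, banned, good)}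
--         if new == good:
--             break
--         good = new
--     return node in good
-- ===== Notes on version B (the rewrite author's own statement) =====
-- stated objective: alternative
-- what changed: A enumerates every simple path by recursive DFS with a copied visited set per branch; B builds an adjacency dict once and computes the least fixpoint of 'good node' (not banned, and sink '6.5.6' or all successors good) by bottom-up rounds with an early stability break, then tests membership.
import Mathlib
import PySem

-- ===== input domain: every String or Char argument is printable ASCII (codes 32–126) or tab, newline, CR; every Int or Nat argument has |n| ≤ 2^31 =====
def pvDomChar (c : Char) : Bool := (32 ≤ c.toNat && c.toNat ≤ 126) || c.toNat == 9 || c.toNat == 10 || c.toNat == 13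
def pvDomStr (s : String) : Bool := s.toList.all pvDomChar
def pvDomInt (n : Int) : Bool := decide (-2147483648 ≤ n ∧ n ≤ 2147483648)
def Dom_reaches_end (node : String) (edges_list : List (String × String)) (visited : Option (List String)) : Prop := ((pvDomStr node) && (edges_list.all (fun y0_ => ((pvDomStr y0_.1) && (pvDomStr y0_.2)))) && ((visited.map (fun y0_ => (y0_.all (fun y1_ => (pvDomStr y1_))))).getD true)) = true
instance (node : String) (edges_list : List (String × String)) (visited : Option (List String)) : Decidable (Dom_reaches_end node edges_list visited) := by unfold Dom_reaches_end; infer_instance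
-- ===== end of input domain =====

-- B replaces A's copy-the-visited-set path enumeration by a bottom-up least-fixpoint
-- iteration over an adjacency dict; equal return values (Python A also adds `node` to a
-- caller-passed visited set — a side effect B does not perform; only the return value is
-- claimed here).

-- ===== PORT A =====
-- termination helper for reachesAux (cited in decreasing_by)
theorem pv_term (node m : String) (visited : List String) (T : Finset String)
    (hnv : node ∉ visited) (hm : m ∈ T) :
    ((insert m T) \ (PySem.Set.add visited node).toFinset).card
      < ((insert node T) \ visited.toFinset).card := by
  have hadd : (PySem.Set.add visited node).toFinset = insert node visited.toFinset := by
    ext x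
    simp [PySem.Set.add, List.contains_eq_mem, hnv]
  apply Finset.card_lt_card
  rw [hadd, Finset.ssubset_iff_of_subset]
  · refine ⟨node, by simp [hnv], by simp⟩
  · intro x hx
    simp only [Finset.mem_sdiff, Finset.mem_insert, not_or] at hx ⊢
    rcases hx with ⟨h1, h2, h3⟩
    refine ⟨?_, h3⟩
    rcases h1 with rfl | h1
    · exact Or.inr hm
    · exact Or.inr h1

-- recursive path DFS; terminates because visited grows by the current node at each call
def reachesAux (edges_list : List (String × String)) (node : String) (visited : List String) : Bool :=
  if node ∈ visited then false
  else
    let visited' := PySem.Set.add visited node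
    let outgoing := (edges_list.filter (fun p => decide (p.1 = node))).map Prod.snd
    if outgoing.isEmpty then node == "6.5.6"
    else outgoing.attach.all (fun m => reachesAux edges_list m.1 visited')
termination_by ((insert node (edges_list.map Prod.snd).toFinset) \ visited.toFinset).card
decreasing_by
  have hnv : node ∉ visited := ‹node ∉ visited›
  have hmT : (m : String) ∈ (edges_list.map Prod.snd).toFinset := by
    obtain ⟨q, -, hq⟩ := List.mem_map.1 m.2
    apply List.mem_toFinset.2
    exact hq ▸ List.mem_map.2 ⟨q.1, q.2, rfl⟩
  exact pv_term node m visited _ hnv hmT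

def reaches_end (node : String) (edges_list : List (String × String)) (visited : Option (List String)) : Bool :=
  reachesAux edges_list node (visited.getD [])

-- ===== PORT B =====
def pvSucc (edges_list : List (String × String)) : PySem.Dict String (List String) :=
  edges_list.foldl (fun d p => d.modify p.1 [] (fun l => l ++ [p.2])) PySem.Dict.empty

def pvOk (succ : PySem.Dict String (List String)) (banned good : List String) (n : String) : Bool :=
  if n ∈ banned then false
  else if (succ.getD n []).isEmpty then n == "6.5.6"
  else (succ.getD n []).all (fun m => decide (m ∈ good))

def pvLoop (succ : PySem.Dict String (List String)) (banned nodes : List String) :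
    Nat → List String → List String
  | 0, good => good
  | k + 1, good =>
      let new := nodes.filter (pvOk succ banned good)
      if PySem.Set.equal new good then good
      else pvLoop succ banned nodes k new

def reaches_end_alt (node : String) (edges_list : List (String × String)) (visited : Option (List String)) : Bool :=
  let banned := visited.getD []
  let succ := pvSucc edges_list
  let nodes := PySem.Set.ofList (node :: edges_list.flatMap (fun p => [p.1, p.2]))
  decide (node ∈ pvLoop succ banned nodes nodes.length [])

-- ===== PRECONDITION & SPEC =====
def Spec_reaches_end (node : String) (edges_list : List (String × String)) (visited : Option (List String)) (out : Bool) : Prop := out = reaches_end_alt node edges_list visited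
instance (node : String) (edges_list : List (String × String)) (visited : Option (List String)) (out : Bool) : Decidable (Spec_reaches_end node edges_list visited out) := by unfold Spec_reaches_end; infer_instance

-- ===== CLAIM (what is proved, stated in full; the proofs are below) =====
def Claim_equal_reaches_end : Prop := ∀ (node : String) (edges_list : List (String × String)) (visited : Option (List String)), Dom_reaches_end node edges_list visited → Spec_reaches_end node edges_list visited (reaches_end node edges_list visited)

-- ===== LEMMAS AND PROOFS =====

-- proof-side characterization of B: successor scan and the bare fixpoint chain
def pvOuts (edges_list : List (String × String)) (n : String) : List String :=
  (edges_list.filter (fun p => decide (p.1 = n))).map Prod.snd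

def pvOkE (edges_list : List (String × String)) (banned good : List String) (n : String) : Bool :=
  if n ∈ banned then false
  else if (pvOuts edges_list n).isEmpty then n == "6.5.6"
  else (pvOuts edges_list n).all (fun m => decide (m ∈ good))

def pvIter (edges_list : List (String × String)) (banned nodes : List String) : Nat → List String
  | 0 => []
  | k + 1 => nodes.filter (pvOkE edges_list banned (pvIter edges_list banned nodes k))

theorem getD_pvSucc (e : List (String × String)) (n : String) :
    (pvSucc e).getD n [] = pvOuts e n := by
  unfold pvSucc pvOuts
  rw [PySem.Dict.getD_foldl_modify_append]
  rw [PySem.Dict.getD_empty, List.nil_append]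
  rfl

theorem pvOk_eq_pvOkE (e : List (String × String)) (b g : List String) (n : String) :
    pvOk (pvSucc e) b g n = pvOkE e b g n := by
  simp [pvOk, pvOkE, getD_pvSucc]

theorem pvOkE_iff {e : List (String × String)} {b g : List String} {n : String} :
    pvOkE e b g n = true ↔
      n ∉ b ∧ ((pvOuts e n).isEmpty → n = "6.5.6") ∧
        (∀ m ∈ pvOuts e n, ¬ (pvOuts e n).isEmpty → m ∈ g) := by
  unfold pvOkE
  split_ifs with h1 h2 <;> simp_all

theorem pvOkE_mono {e : List (String × String)} {b b' g g' : List String} {n : String}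
    (hb : ∀ x, x ∈ b' → x ∈ b) (hg : ∀ x, x ∈ g → x ∈ g')
    (h : pvOkE e b g n = true) : pvOkE e b' g' n = true := by
  rw [pvOkE_iff] at h ⊢
  exact ⟨fun hx => h.1 (hb _ hx), h.2.1, fun m hm hne => hg _ (h.2.2 m hm hne)⟩

theorem pvIter_succ_mem {e : List (String × String)} {b ns : List String} {k : Nat} {x : String} :
    x ∈ pvIter e b ns (k + 1) ↔ x ∈ ns ∧ pvOkE e b (pvIter e b ns k) x = true := by
  simp [pvIter, List.mem_filter]

theorem pvIter_mono {e : List (String × String)} {b ns : List String} :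
    ∀ k, ∀ x ∈ pvIter e b ns k, x ∈ pvIter e b ns (k + 1) := by
  intro k
  induction k with
  | zero => intro x hx; simp [pvIter] at hx
  | succ k ih =>
    intro x hx
    rw [pvIter_succ_mem] at hx ⊢
    exact ⟨hx.1, pvOkE_mono (fun y hy => hy) (fun y hy => ih y hy) hx.2⟩

theorem pvIter_anti {e : List (String × String)} {b b' ns : List String}
    (hb : ∀ x, x ∈ b → x ∈ b') :
    ∀ k, ∀ x ∈ pvIter e b' ns k, x ∈ pvIter e b ns k := by
  intro k
  induction k with
  | zero => intro x hx; simp [pvIter] at hx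
  | succ k ih =>
    intro x hx
    rw [pvIter_succ_mem] at hx ⊢
    exact ⟨hx.1, pvOkE_mono hb (fun y hy => ih y hy) hx.2⟩

theorem mem_add_iff {s : List String} {x y : String} :
    y ∈ PySem.Set.add s x ↔ y ∈ s ∨ y = x := PySem.Set.mem_add s x y

-- banning a node that is not in a fixpoint stage preserves membership of that stage
theorem pvIter_shift {e : List (String × String)} {b ns : List String} {n : String} :
    ∀ k, n ∉ pvIter e b ns k →
      ∀ x ∈ pvIter e b ns k, x ∈ pvIter e (PySem.Set.add b n) ns k := by
  intro k
  induction k with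
  | zero => intro _ x hx; simp [pvIter] at hx
  | succ k ih =>
    intro hn x hx
    have hnk : n ∉ pvIter e b ns k := fun h => hn (pvIter_mono k n h)
    rw [pvIter_succ_mem] at hx ⊢
    refine ⟨hx.1, ?_⟩
    have hxo := hx.2
    rw [pvOkE_iff] at hxo ⊢
    have hxn : x ≠ n := by
      intro h; subst h
      exact hn (pvIter_succ_mem.2 ⟨hx.1, hx.2⟩)
    refine ⟨?_, hxo.2.1, fun m hm hne => ih hnk m (hxo.2.2 m hm hne)⟩
    rw [mem_add_iff]
    rintro (h | h)
    · exact hxo.1 h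
    · exact hxn h

-- the chain stabilizes after ns.length rounds (it grows inside ns until it is stable)
theorem pvIter_stab {e : List (String × String)} {b ns : List String} :
    pvIter e b ns (ns.length + 1) = pvIter e b ns ns.length := by
  have key : ∀ k, pvIter e b ns (k + 1) = pvIter e b ns k ∨
      k + 1 ≤ (pvIter e b ns (k + 1)).length := by
    intro k
    induction k with
    | zero =>
      by_cases h : pvIter e b ns 1 = pvIter e b ns 0
      · exact Or.inl h
      · right
        rcases hc : pvIter e b ns 1 with _ | ⟨y, l⟩
        · exact absurd (by rw [hc]; rfl) h
        · simp
    | succ k ih =>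
      rcases ih with h | h
      · left
        have hdef : pvIter e b ns (k + 2) = ns.filter (pvOkE e b (pvIter e b ns (k + 1))) := rfl
        rw [hdef, h]
        exact h
      · by_cases heq : pvIter e b ns (k + 2) = pvIter e b ns (k + 1)
        · exact Or.inl heq
        · right
          have hsub : (pvIter e b ns (k + 1)).Sublist (pvIter e b ns (k + 2)) := by
            apply List.monotone_filter_right
            intro a ha
            exact pvOkE_mono (fun y hy => hy) (fun y hy => pvIter_mono k y hy) ha
          have hlt : (pvIter e b ns (k + 1)).length < (pvIter e b ns (k + 2)).length := by
            rcases Nat.lt_or_ge (pvIter e b ns (k + 1)).length (pvIter e b ns (k + 2)).length with h' | h'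
            · exact h'
            · exact absurd (hsub.eq_of_length (Nat.le_antisymm hsub.length_le h')).symm heq
          show k + 2 ≤ (pvIter e b ns (k + 2)).length
          omega
  rcases key ns.length with h | h
  · exact h
  · exfalso
    have : (pvIter e b ns (ns.length + 1)).length ≤ ns.length := List.length_filter_le _ _
    omega

-- a node of ns satisfying pvOk at the fixpoint is in the fixpoint
theorem pvIter_close {e : List (String × String)} {b ns : List String} {x : String}
    (hx : x ∈ ns) (h : pvOkE e b (pvIter e b ns ns.length) x = true) :
    x ∈ pvIter e b ns ns.length := by
  rw [← pvIter_stab (e := e) (b := b) (ns := ns)]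
  exact pvIter_succ_mem.2 ⟨hx, h⟩

theorem pvOkE_congr {e : List (String × String)} {b g g' : List String} {n : String}
    (h : ∀ x, x ∈ g ↔ x ∈ g') : pvOkE e b g n = pvOkE e b g' n := by
  rw [Bool.eq_iff_iff, pvOkE_iff, pvOkE_iff]
  constructor
  · rintro ⟨h1, h2, h3⟩; exact ⟨h1, h2, fun m hm hne => (h m).1 (h3 m hm hne)⟩
  · rintro ⟨h1, h2, h3⟩; exact ⟨h1, h2, fun m hm hne => (h m).2 (h3 m hm hne)⟩

theorem pvIter_stab_of_equal {e : List (String × String)} {b ns : List String} {j : Nat}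
    (h : ∀ x, x ∈ pvIter e b ns (j + 1) ↔ x ∈ pvIter e b ns j) :
    ∀ i, pvIter e b ns (j + 1 + i) = pvIter e b ns (j + 1) := by
  intro i
  induction i with
  | zero => rfl
  | succ i ih =>
    have hdef : pvIter e b ns (j + 1 + (i + 1))
        = ns.filter (pvOkE e b (pvIter e b ns (j + 1 + i))) := rfl
    rw [hdef, ih]
    have hcongr : ns.filter (pvOkE e b (pvIter e b ns (j + 1)))
        = ns.filter (pvOkE e b (pvIter e b ns j)) :=
      List.filter_congr (fun x _ => pvOkE_congr h)
    rw [hcongr]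
    rfl

theorem pvLoop_mem {e : List (String × String)} {b ns : List String} :
    ∀ k j x, (x ∈ pvLoop (pvSucc e) b ns k (pvIter e b ns j) ↔ x ∈ pvIter e b ns (j + k)) := by
  intro k
  induction k with
  | zero => intro j x; exact Iff.rfl
  | succ k ih =>
    intro j x
    have hnew : ns.filter (pvOk (pvSucc e) b (pvIter e b ns j)) = pvIter e b ns (j + 1) := by
      have hc : ns.filter (pvOk (pvSucc e) b (pvIter e b ns j))
          = ns.filter (pvOkE e b (pvIter e b ns j)) :=
        List.filter_congr (fun x _ => pvOk_eq_pvOkE e b _ x)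
      rw [hc]
      rfl
    have hdef : pvLoop (pvSucc e) b ns (k + 1) (pvIter e b ns j)
        = (if PySem.Set.equal (ns.filter (pvOk (pvSucc e) b (pvIter e b ns j))) (pvIter e b ns j)
           then pvIter e b ns j
           else pvLoop (pvSucc e) b ns k
             (ns.filter (pvOk (pvSucc e) b (pvIter e b ns j)))) := rfl
    rw [hdef, hnew]
    by_cases hq : PySem.Set.equal (pvIter e b ns (j + 1)) (pvIter e b ns j) = true
    · rw [if_pos hq]
      have hmem := (PySem.Set.equal_iff _ _).1 hq
      have hstab := pvIter_stab_of_equal (e := e) (b := b) (ns := ns) (j := j) hmem k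
      have hidx : j + (k + 1) = j + 1 + k := by omega
      rw [hidx, hstab]
      exact (hmem x).symm
    · rw [if_neg hq]
      have hres := ih (j + 1) x
      have hidx : j + (k + 1) = j + 1 + k := by omega
      rw [hidx]
      exact hres

-- direction A → B
theorem aux_to_iter {e : List (String × String)} {ns : List String}
    (hcl : ∀ p ∈ e, p.2 ∈ ns) :
    ∀ node visited, node ∈ ns → reachesAux e node visited = true →
      node ∈ pvIter e visited ns ns.length := by
  suffices H : ∀ M node visited,
      ((insert node (e.map Prod.snd).toFinset) \ visited.toFinset).card < M →
      node ∈ ns → reachesAux e node visited = true →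
      node ∈ pvIter e visited ns ns.length by
    intro node visited
    exact H _ node visited (Nat.lt_succ_self _)
  intro M
  induction M with
  | zero => intro node visited h; omega
  | succ M ih =>
    intro node visited hM hns hrec
    rw [reachesAux.eq_def] at hrec
    by_cases hnv : node ∈ visited
    · rw [if_pos hnv] at hrec; cases hrec
    · rw [if_neg hnv] at hrec
      replace hrec : (if ((e.filter (fun p => decide (p.1 = node))).map Prod.snd).isEmpty = true
          then node == "6.5.6"
          else ((e.filter (fun p => decide (p.1 = node))).map Prod.snd).attach.all
            (fun m => reachesAux e m.1 (PySem.Set.add visited node))) = true := hrec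
      by_cases hemp : ((e.filter (fun p => decide (p.1 = node))).map Prod.snd).isEmpty = true
      · rw [if_pos hemp] at hrec
        apply pvIter_close hns
        rw [pvOkE_iff]
        refine ⟨hnv, fun _ => by simpa using hrec, ?_⟩
        intro m hm hne
        exact absurd hemp hne
      · rw [if_neg hemp, List.all_eq_true] at hrec
        apply pvIter_close hns
        rw [pvOkE_iff]
        refine ⟨hnv, fun h => absurd h hemp, ?_⟩
        intro m hm _
        have hm' : m ∈ (e.filter (fun p => decide (p.1 = node))).map Prod.snd := hm
        have hmT : m ∈ (e.map Prod.snd).toFinset := by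
          rcases List.mem_map.1 hm' with ⟨p, hp, rfl⟩
          exact List.mem_toFinset.2 (List.mem_map.2 ⟨p, (List.mem_filter.1 hp).1, rfl⟩)
        have hmns : m ∈ ns := by
          rcases List.mem_map.1 hm' with ⟨p, hp, rfl⟩
          exact hcl p (List.mem_filter.1 hp).1
        have hrm : reachesAux e m (PySem.Set.add visited node) = true :=
          hrec ⟨m, hm'⟩ (List.mem_attach _ _)
        have hlt := pv_term node m visited (e.map Prod.snd).toFinset hnv hmT
        have hres := ih m (PySem.Set.add visited node) (by omega) hmns hrm
        exact pvIter_anti (fun x hx => mem_add_iff.2 (Or.inl hx)) ns.length m hres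

-- direction B → A
theorem iter_to_aux {e : List (String × String)} {ns : List String} :
    ∀ k visited node, node ∈ pvIter e visited ns k → reachesAux e node visited = true := by
  intro k
  induction k with
  | zero => intro visited node h; simp [pvIter] at h
  | succ k ih =>
    intro visited node h
    by_cases hk : node ∈ pvIter e visited ns k
    · exact ih visited node hk
    · rw [pvIter_succ_mem] at h
      have hok := h.2
      rw [pvOkE_iff] at hok
      rw [reachesAux.eq_def, if_neg hok.1]
      show (if ((e.filter (fun p => decide (p.1 = node))).map Prod.snd).isEmpty = true
          then node == "6.5.6"
          else ((e.filter (fun p => decide (p.1 = node))).map Prod.snd).attach.all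
            (fun m => reachesAux e m.1 (PySem.Set.add visited node))) = true
      by_cases hemp : ((e.filter (fun p => decide (p.1 = node))).map Prod.snd).isEmpty = true
      · rw [if_pos hemp]
        have : node = "6.5.6" := hok.2.1 hemp
        simp [this]
      · rw [if_neg hemp, List.all_eq_true]
        rintro ⟨m, hm⟩ -
        have hmk : m ∈ pvIter e visited ns k := hok.2.2 m hm hemp
        have hm' : m ∈ pvIter e (PySem.Set.add visited node) ns k :=
          pvIter_shift k hk m hmk
        exact ih _ m hm'

-- ===== VERDICT (by name: the statement is the Claim_ definition above) =====
theorem reaches_end_spec : Claim_equal_reaches_end := by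
  intro node e vis _
  unfold Spec_reaches_end reaches_end reaches_end_alt
  set b := vis.getD [] with hb
  set ns := PySem.Set.ofList (node :: e.flatMap (fun p => [p.1, p.2])) with hns
  have hnode : node ∈ ns := by
    rw [hns]; exact (PySem.Set.mem_ofList _ _).2 (List.mem_cons_self ..)
  have hcl : ∀ p ∈ e, p.2 ∈ ns := by
    intro p hp
    rw [hns]
    apply (PySem.Set.mem_ofList _ _).2
    apply List.mem_cons_of_mem
    exact List.mem_flatMap.2 ⟨p, hp, by simp⟩
  have hloop : ∀ x, x ∈ pvLoop (pvSucc e) b ns ns.length [] ↔ x ∈ pvIter e b ns ns.length := by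
    intro x
    have hx := pvLoop_mem (e := e) (b := b) (ns := ns) ns.length 0 x
    rw [Nat.zero_add] at hx
    exact hx
  cases hA : reachesAux e node b with
  | true =>
    have hmem := aux_to_iter hcl node b hnode hA
    simp [(hloop node).2 hmem]
  | false =>
    by_cases hB : node ∈ pvIter e b ns ns.length
    · have hcontr := iter_to_aux ns.length b node hB
      rw [hA] at hcontr; cases hcontr
    · have hnot : node ∉ pvLoop (pvSucc e) b ns ns.length [] := fun h => hB ((hloop node).1 h)
      simp [hnot]
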